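-- pv_equiv track=rewrite | github.com/coderegular/Event-Driven | main.py | schedule_event
-- ===== SOURCE A (Python) =====
-- def naming_Op(my_op_list):
--     op = "op"
--     counter = 1
--     my_dict = {}
--     for i in my_op_list:
--         my_dict[op + str(counter)] = i
--         counter += 1
--     return my_dict
--
-- def named_op_with_pi_po(signals):
--     named_op = list(naming_Op(signals).keys())
--     op_signals = {}
--     for i in range(len(named_op)):
--         op_signals[named_op[i]] = signals[i]
--     return op_signals
--
-- def activity_list(event, signals, delay, t):
--     op_signals = named_op_with_pi_po(signals)
--     act_list = {}
--     for i in event: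
--         for j in op_signals:
--             if i in op_signals[j][1:]:
--                 act_list[op_signals[j][0]] = int(delay[j]) + t
--     return act_list
--
-- def schedule_event(t, event, act, signals, delay):
--     if t == 0:
--         return event, activity_list(event, signals, delay, t)
--     else:
--         temp = []
--         my_flag = False
--         for i in act:
--             if int(act[i]) == t:
--                 my_flag = True
--                 temp.append(i)
--         if my_flag:
--             for i in temp:
--                 if i in act:
--                     act.pop(i)
--             t = activity_list(temp, signals, delay, t)
--             for j in t:
--                 act[j] = t[j]
--             return temp, act
--         else:
--             return event, act
-- ===== SOURCE B (Python) =====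
-- def _activity(events, signals, delay, t):
--     # inverted index: signal value -> [(output signal, op name)] in op order
--     index = {}
--     for num, sig in enumerate(signals, 1):
--         op = "op" + str(num)
--         head = sig[0] if sig else None
--         for v in dict.fromkeys(sig[1:]):
--             index.setdefault(v, []).append((head, op))
--     out = {}
--     for e in events:
--         for head, op in index.get(e, ()):
--             out[head] = int(delay[op]) + t
--     return out
--
-- def schedule_event(t, event, act, signals, delay):
--     if t == 0:
--         return event, _activity(event, signals, delay, t)
--     due = [k for k, v in act.items() if int(v) == t]
--     if not due:
--         return event, act
--     for k in due:
--         del act[k]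
--     act.update(_activity(due, signals, delay, t))
--     return due, act
-- ===== Notes on version B (the rewrite author's own statement) =====
-- stated objective: alternative
-- what changed: B replaces A's rebuild of the op-name dict and its per-event linear scan over every signal list (membership test against each sliced tail) by a single inverted index from input-signal value to (output signal, op name) built once, so each event is handled by one dictionary lookup over only its matching ops.
import Mathlib
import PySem

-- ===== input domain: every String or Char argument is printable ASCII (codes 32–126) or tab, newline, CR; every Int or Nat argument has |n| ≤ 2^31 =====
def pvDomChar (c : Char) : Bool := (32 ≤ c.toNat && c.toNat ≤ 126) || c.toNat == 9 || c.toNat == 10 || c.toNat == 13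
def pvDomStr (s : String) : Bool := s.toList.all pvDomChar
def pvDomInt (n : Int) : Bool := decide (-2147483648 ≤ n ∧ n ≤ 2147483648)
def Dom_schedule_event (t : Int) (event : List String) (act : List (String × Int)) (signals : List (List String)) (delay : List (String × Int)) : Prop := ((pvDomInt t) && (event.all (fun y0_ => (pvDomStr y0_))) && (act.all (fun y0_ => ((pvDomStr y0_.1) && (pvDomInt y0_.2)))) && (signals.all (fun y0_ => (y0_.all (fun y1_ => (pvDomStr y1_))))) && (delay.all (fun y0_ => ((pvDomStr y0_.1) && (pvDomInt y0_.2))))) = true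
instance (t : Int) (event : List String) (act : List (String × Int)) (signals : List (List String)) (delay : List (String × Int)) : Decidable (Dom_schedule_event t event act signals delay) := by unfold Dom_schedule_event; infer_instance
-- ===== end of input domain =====

-- B replaces A's per-event scan of all signal lists by an inverted index from input-signal value to
-- (output signal, op name), built once; per event only the matching ops are visited (objective:
-- alternative algorithm; not measurably faster on the generated inputs).
-- A mutates its dict argument `act` in place (pops due keys, merges new ones); the equivalence proved
-- here is about the RETURN value only.


-- ===== PORT A =====
-- naming_Op: dict "op1".."opN" -> signal list, built with a running counter
def naming_Op (my_op_list : List (List String)) : PySem.Dict String (List String) :=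
  (my_op_list.foldl
    (fun (st : PySem.Dict String (List String) × Int) i =>
      (st.1.insert ("op" ++ PySem.Int.toStr st.2) i, st.2 + 1))
    (PySem.Dict.empty, 1)).1

-- named_op_with_pi_po: rebuilds the dict from the key list by position
-- (named_op[i] / signals[i]: both indices are in range, so getD is exact here)
def named_op_with_pi_po (signals : List (List String)) : PySem.Dict String (List String) :=
  let named_op := (naming_Op signals).keys
  (List.range named_op.length).foldl
    (fun d i => d.insert (named_op.getD i "") (signals.getD i [])) PySem.Dict.empty

-- activity_list; `delay` arrives as a dict. delay[j] raises KeyError on a missing key — those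
-- inputs are excluded by Pre_; the port uses getD _ 0 there. op_signals[j][0] is only evaluated
-- when the [1:] tail matched, i.e. on a nonempty list, so headD "" is exact.
def activity_list (event : List String) (signals : List (List String)) (delay : PySem.Dict String Int) (t : Int) : PySem.Dict String Int :=
  let op_signals := named_op_with_pi_po signals
  event.foldl
    (fun act_list i =>
      op_signals.keys.foldl
        (fun act_list j =>
          if ((op_signals.getD j []).drop 1).contains i then
            act_list.insert ((op_signals.getD j []).headD "") (delay.getD j 0 + t)
          else act_list)
        act_list)
    PySem.Dict.empty

def schedule_event (t : Int) (event : List String) (act : List (String × Int)) (signals : List (List String)) (delay : List (String × Int)) : List String × (List (String × Int)) :=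
  let actd := PySem.Dict.ofList act
  let delayd := PySem.Dict.ofList delay
  if t = 0 then (event, (activity_list event signals delayd t).items)
  else
    -- temp/my_flag: one loop over the keys of act
    let st := actd.keys.foldl
      (fun (st : List String × Bool) i =>
        if actd.getD i 0 = t then (st.1 ++ [i], true) else st) ([], false)
    if st.2 then
      let act1 := st.1.foldl (fun a i => if a.contains i then a.erase i else a) actd
      let tdict := activity_list st.1 signals delayd t
      let act2 := tdict.keys.foldl (fun a j => a.insert j (tdict.getD j 0)) act1
      (st.1, act2.items)
    else (event, actd.items)

-- ===== PORT B =====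
-- _activity of Source B: inverted index value -> [(head, op)], then direct lookups per event.
-- Source B's `sig[0] if sig else None` is only consulted when sig has a tail, so headD "" is exact;
-- delay[op] raises KeyError on a missing key (excluded by Pre_), the port uses getD _ 0 there.
def pv_activity (events : List String) (signals : List (List String)) (delay : PySem.Dict String Int) (t : Int) : PySem.Dict String Int :=
  let index := (PySem.List.enumerate signals 1).foldl
    (fun (index : PySem.Dict String (List (String × String))) q =>
      let op := "op" ++ PySem.Int.toStr q.1
      let head := q.2.headD ""
      (PySem.List.dedup (q.2.drop 1)).foldl
        (fun index v => index.modify v [] (· ++ [(head, op)]))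
        index)
    PySem.Dict.empty
  events.foldl
    (fun out e =>
      (index.getD e []).foldl (fun out p => out.insert p.1 (delay.getD p.2 0 + t)) out)
    PySem.Dict.empty

def schedule_event_alt (t : Int) (event : List String) (act : List (String × Int)) (signals : List (List String)) (delay : List (String × Int)) : List String × (List (String × Int)) :=
  let actd := PySem.Dict.ofList act
  let delayd := PySem.Dict.ofList delay
  if t = 0 then (event, (pv_activity event signals delayd t).items)
  else
    let due := (actd.items.filter (fun p => p.2 == t)).map (·.1)
    if due.isEmpty then (event, actd.items)
    else
      let act1 := due.foldl (fun a k => a.erase k) actd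
      let act2 := (pv_activity due signals delayd t).items.foldl (fun a p => a.insert p.1 p.2) act1
      (due, act2.items)

-- ===== PRECONDITION & SPEC =====
-- Pre_ excludes exactly the inputs on which Python A raises KeyError: some processed event
-- (event itself at t = 0, else the keys of act due at time t) occurs in the tail of the k-th
-- signal list while delay has no entry for "op<k+1>".
def Pre_schedule_event (t : Int) (event : List String) (act : List (String × Int)) (signals : List (List String)) (delay : List (String × Int)) : Prop :=
  (let ev := if t = 0 then event else (((PySem.Dict.ofList act).items.filter (fun p => p.2 == t)).map (·.1))
   (PySem.List.enumerate signals 1).all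
     (fun q => ((q.2.drop 1).all (fun v => !(ev.contains v))) ||
               (PySem.Dict.ofList delay).contains ("op" ++ PySem.Int.toStr q.1))) = true
instance (t : Int) (event : List String) (act : List (String × Int)) (signals : List (List String)) (delay : List (String × Int)) : Decidable (Pre_schedule_event t event act signals delay) := by unfold Pre_schedule_event; infer_instance

def pvWitness_schedule_event : Int × List String × (List (String × Int)) × List (List String) × (List (String × Int)) :=
  (0, ["a"], [("b", 1)], [["x", "a"]], [("op1", 2)])

def Spec_schedule_event (t : Int) (event : List String) (act : List (String × Int)) (signals : List (List String)) (delay : List (String × Int)) (out : List String × (List (String × Int))) : Prop := out = schedule_event_alt t event act signals delay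
instance (t : Int) (event : List String) (act : List (String × Int)) (signals : List (List String)) (delay : List (String × Int)) (out : List String × (List (String × Int))) : Decidable (Spec_schedule_event t event act signals delay out) := by unfold Spec_schedule_event; infer_instance

-- ===== CLAIM (what is proved, stated in full; the proofs are below) =====
def Claim_equal_schedule_event : Prop := ∀ (t : Int) (event : List String) (act : List (String × Int)) (signals : List (List String)) (delay : List (String × Int)), Dom_schedule_event t event act signals delay → Pre_schedule_event t event act signals delay → Spec_schedule_event t event act signals delay (schedule_event t event act signals delay)


-- ===== LEMMAS AND PROOFS =====

def pvOpName (c : Int) : String := "op" ++ PySem.Int.toStr c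

-- `str(n)` is injective on positive integers; no library lemma states this, so it is proved here.
theorem pvDigitChar_inj (a b : Nat) (ha : a < 10) (hb : b < 10)
    (h : Nat.digitChar a = Nat.digitChar b) : a = b := by
  revert h; interval_cases a <;> interval_cases b <;> decide

theorem pvMapDigitChar_inj : ∀ (l₁ l₂ : List Nat), (∀ x ∈ l₁, x < 10) → (∀ x ∈ l₂, x < 10) →
    l₁.map Nat.digitChar = l₂.map Nat.digitChar → l₁ = l₂ := by
  intro l₁
  induction l₁ with
  | nil => intro l₂ _ _ h; cases l₂ <;> simp_all
  | cons a l ih =>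
    intro l₂ h1 h2 h
    cases l₂ with
    | nil => simp_all
    | cons b l' =>
      simp only [List.map_cons, List.cons.injEq] at h
      have : a = b := pvDigitChar_inj a b (h1 a (by simp)) (h2 b (by simp)) h.1
      subst this
      exact congrArg _ (ih l' (fun x hx => h1 x (by simp [hx])) (fun x hx => h2 x (by simp [hx])) h.2)

theorem pvToDigitsCore_spec : ∀ (f n : Nat) (ds : List Char), n < f →
    Nat.toDigitsCore 10 f n ds =
      (if n = 0 then ['0'] else ((Nat.digits 10 n).reverse.map Nat.digitChar)) ++ ds := by
  intro f
  induction f with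
  | zero => intro n ds h; omega
  | succ f ih =>
    intro n ds h
    rw [Nat.toDigitsCore]
    by_cases h0 : n / 10 = 0
    · simp only [h0, if_true]
      by_cases hz : n = 0
      · subst hz; simp; decide
      · have hlt : n < 10 := by omega
        rw [if_neg hz, Nat.digits_def' (by norm_num : 1 < 10) (by omega), Nat.mod_eq_of_lt hlt, h0]
        simp
    · simp only [h0, if_false]
      have hn : 0 < n := by omega
      have hrec : n / 10 < f := by
        have := Nat.div_lt_self hn (by norm_num : 1 < 10)
        omega
      rw [ih (n / 10) (Nat.digitChar (n % 10) :: ds) hrec]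
      rw [if_neg h0, if_neg (by omega : ¬ n = 0)]
      rw [Nat.digits_def' (by norm_num : 1 < 10) hn]
      simp

theorem pvToDigits_inj (m n : Nat) (h : Nat.toDigits 10 m = Nat.toDigits 10 n) : m = n := by
  unfold Nat.toDigits at h
  rw [pvToDigitsCore_spec (m+1) m [] (by omega), pvToDigitsCore_spec (n+1) n [] (by omega)] at h
  simp only [List.append_nil] at h
  have key : ∀ k : Nat, k ≠ 0 → ((Nat.digits 10 k).reverse.map Nat.digitChar) ≠ ['0'] := by
    intro k hk hc
    have h1 : (Nat.digits 10 k).reverse = [0] := by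
      have hlen : (Nat.digits 10 k).reverse.length = 1 := by
        have := congrArg List.length hc; simpa using this
      obtain ⟨d, hd⟩ := List.length_eq_one_iff.mp hlen
      rw [hd] at hc
      simp only [List.map_cons, List.map_nil, List.cons.injEq] at hc
      have hdlt : d < 10 := by
        have : d ∈ Nat.digits 10 k := by
          have : d ∈ (Nat.digits 10 k).reverse := by simp [hd]
          simpa using this
        exact Nat.digits_lt_base (by norm_num) this
      have : d = 0 := pvDigitChar_inj d 0 hdlt (by norm_num) (by simpa using hc.1)
      rw [hd, this]
    have h2 : Nat.digits 10 k = [0] := by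
      have := congrArg List.reverse h1; simpa using this
    exact Nat.getLast_digit_ne_zero 10 hk (by simp [h2])
  by_cases hm : m = 0 <;> by_cases hn : n = 0
  · omega
  · rw [if_pos hm, if_neg hn] at h; exact absurd h.symm (key n hn)
  · rw [if_neg hm, if_pos hn] at h; exact absurd h (key m hm)
  · rw [if_neg hm, if_neg hn] at h
    have := pvMapDigitChar_inj _ _
      (fun x hx => Nat.digits_lt_base (by norm_num) (by simpa using hx))
      (fun x hx => Nat.digits_lt_base (by norm_num) (by simpa using hx)) h
    have := List.reverse_injective this
    exact Nat.digits.injective 10 this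

theorem pvOpName_inj (a b : Int) (ha : 1 ≤ a) (hb : 1 ≤ b) (h : pvOpName a = pvOpName b) : a = b := by
  unfold pvOpName at h
  have h1 : ("op" ++ PySem.Int.toStr a).toList = ("op" ++ PySem.Int.toStr b).toList := by rw [h]
  rw [String.toList_append, String.toList_append, PySem.Int.toList_toStr, PySem.Int.toList_toStr] at h1
  have h2 : PySem.Int.toChars a = PySem.Int.toChars b := List.append_cancel_left h1
  unfold PySem.Int.toChars at h2
  rw [if_neg (by omega), if_neg (by omega)] at h2
  have := pvToDigits_inj a.toNat b.toNat h2
  omega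

-- characterization of A's op dicts
theorem pvNaming_aux : ∀ (l : List (List String)) (d : PySem.Dict String (List String)) (c : Int),
    1 ≤ c → (∀ k, d.contains k = true → ∃ j, 1 ≤ j ∧ j < c ∧ k = pvOpName j) →
    (l.foldl (fun st i => (st.1.insert ("op" ++ PySem.Int.toStr st.2) i, st.2 + 1)) (d, c)).1.items
      = d.items ++ (PySem.List.enumerate l c).map (fun q => (pvOpName q.1, q.2)) := by
  intro l
  induction l with
  | nil => intro d c _ _; simp [PySem.List.enumerate_nil]
  | cons x l ih =>
    intro d c hc hd
    have hfresh : d.contains (pvOpName c) = false := by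
      by_contra hcon
      obtain ⟨j, hj1, hj2, hj3⟩ := hd (pvOpName c) (by
        cases hcc : d.contains (pvOpName c)
        · exact absurd hcc hcon
        · rfl)
      have := pvOpName_inj _ _ hc hj1 hj3
      omega
    simp only [List.foldl_cons]
    rw [ih (d.insert ("op" ++ PySem.Int.toStr c) x) (c + 1) (by omega)
      (by
        intro k hk
        rw [PySem.Dict.contains_insert] at hk
        rcases Bool.or_eq_true_iff.mp hk with h1 | h2
        · exact ⟨c, hc, by omega, by simpa [pvOpName] using (beq_iff_eq.mp h1)⟩
        · obtain ⟨j, a1, a2, a3⟩ := hd k h2; exact ⟨j, a1, by omega, a3⟩)]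
    rw [PySem.Dict.items_insert_of_not_contains _ _ (by simpa [pvOpName] using hfresh)]
    rw [PySem.List.enumerate_cons]
    simp [pvOpName]

theorem pvNaming_items (signals : List (List String)) :
    (naming_Op signals).items =
      (PySem.List.enumerate signals 1).map (fun q => (pvOpName q.1, q.2)) := by
  unfold naming_Op
  rw [pvNaming_aux signals PySem.Dict.empty 1 (by omega)
    (by intro k hk; simp [PySem.Dict.contains_empty] at hk)]
  simp [PySem.Dict.empty]

theorem pvRangeMapGetD {α : Type} (l : List α) (d : α) :
    (List.range l.length).map (fun i => l.getD i d) = l := by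
  apply List.ext_getElem (by simp)
  intro i h1 h2
  simp [List.getElem?_eq_getElem h2]

theorem pvEnum_fst_mem {α : Type} (xs : List α) (s : Int) (p : Int × α)
    (h : p ∈ PySem.List.enumerate xs s) : s ≤ p.1 := by
  rw [PySem.List.mem_enumerate_iff] at h
  obtain ⟨k, hk, rfl⟩ := h
  simp

theorem pvEnum_nodup_opname (signals : List (List String)) :
    ((PySem.List.enumerate signals 1).map (fun q => pvOpName q.1)).Nodup := by
  apply List.Nodup.map_on
  · intro p hp q hq h
    have h1 := pvEnum_fst_mem _ _ _ hp
    have h2 := pvEnum_fst_mem _ _ _ hq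
    have hfst : p.1 = q.1 := pvOpName_inj _ _ h1 h2 h
    rw [PySem.List.mem_enumerate_iff] at hp hq
    obtain ⟨k1, hk1, rfl⟩ := hp
    obtain ⟨k2, hk2, rfl⟩ := hq
    have : k1 = k2 := by simp at hfst; omega
    subst this; rfl
  · exact (PySem.List.pairwise_lt_enumerate signals 1).imp
      (fun h heq => by subst heq; exact lt_irrefl _ h)

theorem pvNamed_items (signals : List (List String)) :
    (named_op_with_pi_po signals).items =
      (PySem.List.enumerate signals 1).map (fun q => (pvOpName q.1, q.2)) := by
  unfold named_op_with_pi_po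
  have hkeys : (naming_Op signals).keys
      = (PySem.List.enumerate signals 1).map (fun q => pvOpName q.1) := by
    simp only [PySem.Dict.keys, pvNaming_items]
    simp
  set named := (naming_Op signals).keys with hn
  have hlen : named.length = signals.length := by
    rw [hkeys]; simp [PySem.List.length_enumerate]
  have hmapk : (List.range named.length).map (fun i => named.getD i "") = named :=
    pvRangeMapGetD named ""
  rw [PySem.Dict.items_foldl_insert_fresh (List.range named.length)
    (fun i => named.getD i "") (fun i => signals.getD i []) PySem.Dict.empty
    (by intro a _; simp [PySem.Dict.contains_empty])
    (by rw [hmapk, hkeys]; exact pvEnum_nodup_opname signals)]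
  have hempty : (PySem.Dict.empty : PySem.Dict String (List String)).items = [] := by
    simp [PySem.Dict.empty]
  rw [hempty, List.nil_append]
  apply List.ext_getElem (by simp [hlen, PySem.List.length_enumerate])
  intro i h1 h2
  simp only [List.getElem_map, List.getElem_range]
  have hi : i < signals.length := by simp [hlen] at h1; omega
  rw [PySem.List.getElem_enumerate signals 1 i (by simp [PySem.List.length_enumerate]; omega)]
  have hni : i < named.length := by omega
  rw [List.getD_eq_getElem named "" hni, List.getD_eq_getElem signals [] hi]
  have h? : named[i]? = some (pvOpName (1 + (i : Int))) := by
    rw [hkeys]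
    simp only [List.getElem?_map, PySem.List.getElem?_enumerate, List.getElem?_eq_getElem hi]
    rfl
  rw [List.getElem?_eq_getElem hni] at h?
  simp only [Option.some.injEq] at h?
  rw [h?]

-- characterization of B's inverted index
theorem pvInner_getD (x : String × String) (e : String) :
    ∀ (l : List String) (d : PySem.Dict String (List (String × String))), l.Nodup →
    (l.foldl (fun d v => d.modify v [] (· ++ [x])) d).getD e []
      = d.getD e [] ++ (if e ∈ l then [x] else []) := by
  intro l
  induction l with
  | nil => intro d _; simp
  | cons a l ih =>
    intro d hnd
    simp only [List.foldl_cons]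
    rw [ih _ (List.Nodup.of_cons hnd)]
    rw [PySem.Dict.getD_modify]
    by_cases he : e = a
    · subst he
      have : e ∉ l := (List.nodup_cons.mp hnd).1
      simp [this]
    · simp [he, List.mem_cons]

theorem pvIndex_getD (e : String) :
  ∀ (ps : List (Int × List String)) (d : PySem.Dict String (List (String × String))),
    (ps.foldl
      (fun d q => (PySem.List.dedup (q.2.drop 1)).foldl
        (fun d v => d.modify v [] (· ++ [(q.2.headD "", pvOpName q.1)])) d) d).getD e []
    = d.getD e [] ++
      (ps.filter (fun q => (q.2.drop 1).contains e)).map (fun q => (q.2.headD "", pvOpName q.1)) := by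
  intro ps
  induction ps with
  | nil => intro d; simp
  | cons q ps ih =>
    intro d
    simp only [List.foldl_cons, List.filter_cons]
    rw [ih]
    rw [pvInner_getD _ e _ d (PySem.List.nodup_dedup _)]
    by_cases hm : e ∈ q.2.drop 1
    · rw [if_pos (by rwa [PySem.List.mem_dedup])]
      rw [if_pos (by simpa using hm)]
      simp
    · rw [if_neg (by rwa [PySem.List.mem_dedup])]
      rw [if_neg (by simpa using hm)]
      simp

-- the two activity computations agree
theorem pvActivity_eq (ev : List String) (signals : List (List String))
    (delayd : PySem.Dict String Int) (t : Int) :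
    activity_list ev signals delayd t = pv_activity ev signals delayd t := by
  unfold activity_list pv_activity
  apply PySem.List.foldl_congr_mem'
  intro e _ al
  have hkeys : (named_op_with_pi_po signals).keys
      = (PySem.List.enumerate signals 1).map (fun q => pvOpName q.1) := by
    simp only [PySem.Dict.keys, pvNamed_items]; simp
  have hnodup : (named_op_with_pi_po signals).keys.Nodup := by
    rw [hkeys]; exact pvEnum_nodup_opname signals
  have hgetD : ∀ q ∈ PySem.List.enumerate signals 1,
      (named_op_with_pi_po signals).getD (pvOpName q.1) [] = q.2 := by
    intro q hq
    exact PySem.Dict.getD_of_mem_items _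
      (by rw [pvNamed_items]; exact List.mem_map_of_mem hq) hnodup []
  rw [hkeys, List.foldl_map]
  rw [PySem.List.foldl_congr_mem' _ _
    (fun al q => if ((q.2 : List String).drop 1).contains e then
        al.insert (q.2.headD "") (delayd.getD (pvOpName q.1) 0 + t) else al) al
    (by intro q hq acc; rw [hgetD q hq])]
  rw [PySem.List.foldl_if_eq_foldl_filter
    (fun q : Int × List String => (q.2.drop 1).contains e)
    (fun al q => al.insert (q.2.headD "") (delayd.getD (pvOpName q.1) 0 + t))
    (PySem.List.enumerate signals 1) al]
  have hidx := pvIndex_getD e (PySem.List.enumerate signals 1) PySem.Dict.empty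
  rw [PySem.Dict.getD_empty, List.nil_append] at hidx
  simp only [pvOpName] at hidx
  rw [hidx, List.foldl_map]
  simp [pvOpName]

-- scheduler-level helpers
theorem pvStFold (p : String → Prop) [DecidablePred p] : ∀ (l : List String) (acc : List String × Bool),
    l.foldl (fun st i => if p i then (st.1 ++ [i], true) else st) acc
      = (acc.1 ++ l.filter (fun i => decide (p i)), acc.2 || l.any (fun i => decide (p i))) := by
  intro l
  induction l with
  | nil => intro acc; simp
  | cons a l ih =>
    intro acc
    simp only [List.foldl_cons, List.filter_cons, List.any_cons]
    by_cases hp : p a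
    · rw [if_pos hp, ih]; simp [hp]
    · rw [if_neg hp, ih]; simp [hp]

theorem pvEraseIf (a : PySem.Dict String Int) (i : String) :
    (if a.contains i then a.erase i else a) = a.erase i := by
  cases h : a.contains i
  · simp only [Bool.false_eq_true, if_false]
    apply PySem.Dict.ext
    show a.items = (a.items.filter fun p => !p.1 == i)
    symm
    rw [List.filter_eq_self]
    intro p hp
    simp only [PySem.Dict.contains, List.any_eq_false] at h
    simpa using h p hp
  · simp

theorem pvFoldNodup (g : String → List (String × String)) (h : String × String → Int) :
    ∀ (ev : List String) (d : PySem.Dict String Int), d.keys.Nodup →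
    (ev.foldl (fun out e => (g e).foldl (fun out p => out.insert p.1 (h p)) out) d).keys.Nodup := by
  intro ev
  induction ev with
  | nil => intro d hd; exact hd
  | cons e ev ih =>
    intro d hd
    exact ih _ (PySem.Dict.nodup_keys_foldl_insert_key (g e) Prod.fst (fun d p => h p) d hd)

theorem pvActivity_nodup_keys (ev : List String) (signals : List (List String))
    (delayd : PySem.Dict String Int) (t : Int) :
    (pv_activity ev signals delayd t).keys.Nodup := by
  unfold pv_activity
  exact pvFoldNodup _ _ ev PySem.Dict.empty (by simp [PySem.Dict.empty])

-- ===== VERDICT (by name: the statement is the Claim_ definition above) =====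
theorem schedule_event_spec : Claim_equal_schedule_event := by
  intro t event act signals delay _ _
  unfold Spec_schedule_event schedule_event schedule_event_alt
  by_cases ht : t = 0
  · simp [ht, pvActivity_eq]
  · simp only [if_neg ht]
    set actd := PySem.Dict.ofList act with hactd
    set delayd := PySem.Dict.ofList delay with hdelayd
    rw [pvStFold (fun i => actd.getD i 0 = t) actd.keys ([], false)]
    have hfilter : actd.keys.filter (fun i => decide (actd.getD i 0 = t))
        = (actd.items.filter (fun p => p.2 == t)).map (·.1) := by
      simp only [PySem.Dict.keys]
      rw [List.filter_map]
      apply congrArg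
      apply List.filter_congr
      intro p hp
      have hv := PySem.Dict.getD_of_mem_items (d := actd) (k := p.1) (v := p.2)
        hp (PySem.Dict.nodup_keys_ofList act) 0
      by_cases h' : p.2 = t
      · simp [Function.comp, hv, h']
      · simp [Function.comp, hv, h']
    by_cases hdue : (actd.items.filter (fun p => p.2 == t)).map (·.1) = []
    · have hfe : actd.keys.filter (fun i => decide (actd.getD i 0 = t)) = [] :=
        hfilter.trans hdue
      have hany : actd.keys.any (fun i => decide (actd.getD i 0 = t)) = false := by
        rw [List.any_eq_false]
        intro x hx hpx
        have : x ∈ actd.keys.filter (fun i => decide (actd.getD i 0 = t)) :=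
          List.mem_filter.mpr ⟨hx, hpx⟩
        rw [hfe] at this
        simp at this
      simp [hany, hdue]
    · have hne : actd.keys.filter (fun i => decide (actd.getD i 0 = t)) ≠ [] := by
        rw [hfilter]; exact hdue
      have hany : actd.keys.any (fun i => decide (actd.getD i 0 = t)) = true := by
        obtain ⟨x, hx⟩ := List.exists_mem_of_ne_nil _ hne
        have := List.mem_filter.mp hx
        exact List.any_eq_true.mpr ⟨x, this.1, this.2⟩
      have hempty : ((actd.items.filter (fun p => p.2 == t)).map (·.1)).isEmpty = false := by
        cases h : ((actd.items.filter (fun p => p.2 == t)).map (·.1)).isEmpty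
        · rfl
        · exact absurd (List.isEmpty_iff.mp h) hdue
      simp only [hany, Bool.false_or, if_true, hempty, Bool.false_eq_true, if_false]
      rw [List.nil_append, hfilter]
      set due := (actd.items.filter (fun p => p.2 == t)).map (·.1) with hd
      congr 1
      have herase : due.foldl (fun a i => if a.contains i then a.erase i else a) actd
          = due.foldl (fun a k => a.erase k) actd :=
        PySem.List.foldl_congr_mem' due _ _ actd (fun i _ a => pvEraseIf a i)
      rw [herase, pvActivity_eq]
      set tdict := pv_activity due signals delayd t with htd
      rw [PySem.Dict.items_eq_map_keys tdict (pvActivity_nodup_keys due signals delayd t) 0]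
      simp [List.foldl_map]
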